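-- pv_equiv track=rewrite | github.com/AdvikWWW/SleepEEG | backend/reproducibility_utils.py | detect_sleep_window
-- ===== SOURCE A (Python) =====
-- from typing import Dict, List, Tuple, Any
--
-- def detect_sleep_window(hypnogram: List[Dict[str, Any]]) -> Dict[str, Any]:
--     """
--     Detect the sleep window from hypnogram data
--     Sleep window = first non-wake epoch to last non-wake epoch
--     """
--     if not hypnogram:
--         return {
--             'sleep_onset_index': 0,
--             'final_awakening_index': 0,
--             'sleep_window_epochs': 0,
--             'pre_sleep_wake_epochs': 0,
--             'post_sleep_wake_epochs': 0
--         }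
--
--     # Find first non-wake epoch (sleep onset)
--     sleep_onset_index = None
--     for i, epoch in enumerate(hypnogram):
--         if epoch.get('stage') != 'Wake':
--             sleep_onset_index = i
--             break
--
--     # Find last non-wake epoch (final awakening)
--     final_awakening_index = None
--     for i in range(len(hypnogram) - 1, -1, -1):
--         if hypnogram[i].get('stage') != 'Wake':
--             final_awakening_index = i
--             break
--
--     # Handle edge cases
--     if sleep_onset_index is None or final_awakening_index is None:
--         return {
--             'sleep_onset_index': 0,
--             'final_awakening_index': len(hypnogram) - 1,
--             'sleep_window_epochs': len(hypnogram),
--             'pre_sleep_wake_epochs': 0,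
--             'post_sleep_wake_epochs': 0
--         }
--
--     sleep_window_epochs = final_awakening_index - sleep_onset_index + 1
--     pre_sleep_wake_epochs = sleep_onset_index
--     post_sleep_wake_epochs = len(hypnogram) - final_awakening_index - 1
--
--     return {
--         'sleep_onset_index': sleep_onset_index,
--         'final_awakening_index': final_awakening_index,
--         'sleep_window_epochs': sleep_window_epochs,
--         'pre_sleep_wake_epochs': pre_sleep_wake_epochs,
--         'post_sleep_wake_epochs': post_sleep_wake_epochs
--     }
-- ===== SOURCE B (Python) =====
-- def _span(hyp, base):
--     """Divide and conquer: return (first, last) absolute indices of non-wake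
--     epochs within hyp (offset by base), or None if all epochs are wake."""
--     if len(hyp) <= 1:
--         if not hyp:
--             return None
--         return (base, base) if hyp[0].get('stage') != 'Wake' else None
--     m = len(hyp) // 2
--     left = _span(hyp[:m], base)
--     right = _span(hyp[m:], base + m)
--     if left is None:
--         return right
--     if right is None:
--         return left
--     return (left[0], right[1])
--
--
-- def detect_sleep_window(hypnogram):
--     n = len(hypnogram)
--     if n == 0:
--         return {
--             'sleep_onset_index': 0,
--             'final_awakening_index': 0,
--             'sleep_window_epochs': 0,
--             'pre_sleep_wake_epochs': 0,
--             'post_sleep_wake_epochs': 0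
--         }
--     span = _span(hypnogram, 0)
--     if span is None:
--         return {
--             'sleep_onset_index': 0,
--             'final_awakening_index': n - 1,
--             'sleep_window_epochs': n,
--             'pre_sleep_wake_epochs': 0,
--             'post_sleep_wake_epochs': 0
--         }
--     s, f = span
--     return {
--         'sleep_onset_index': s,
--         'final_awakening_index': f,
--         'sleep_window_epochs': f - s + 1,
--         'pre_sleep_wake_epochs': s,
--         'post_sleep_wake_epochs': n - f - 1
--     }
-- ===== Notes on version B (the rewrite author's own statement) =====
-- stated objective: alternative
-- what changed: Replaced A's two directional index scans by a recursive divide-and-conquer: the list is split in half, each half yields an optional (first,last) non-wake span, and the two spans are merged; indices never scanned linearly from either end.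
import Mathlib
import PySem

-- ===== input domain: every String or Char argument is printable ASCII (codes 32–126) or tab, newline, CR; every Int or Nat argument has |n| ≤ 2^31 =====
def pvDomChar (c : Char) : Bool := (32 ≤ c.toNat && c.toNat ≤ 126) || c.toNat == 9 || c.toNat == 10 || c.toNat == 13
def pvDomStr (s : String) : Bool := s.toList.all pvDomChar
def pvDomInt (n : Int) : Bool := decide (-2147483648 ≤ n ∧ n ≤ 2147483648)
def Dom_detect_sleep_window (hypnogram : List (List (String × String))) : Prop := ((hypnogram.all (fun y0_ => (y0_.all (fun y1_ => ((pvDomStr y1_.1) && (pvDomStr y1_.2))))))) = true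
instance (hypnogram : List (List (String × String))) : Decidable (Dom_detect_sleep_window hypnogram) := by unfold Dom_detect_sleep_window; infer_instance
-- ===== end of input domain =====

-- B replaces A's two directional index scans by a recursive divide-and-conquer span merge (alternative; same result).

-- shared helper: epoch.get('stage') (first-match dict lookup)
def dswStage (epoch : List (String × String)) : Option String :=
  PySem.Dict.get? ⟨epoch⟩ "stage"

-- ===== PORT A =====
-- forward loop: for i, epoch in enumerate(hypnogram): if epoch.get('stage') != 'Wake': break
def dswScanF : List (Int × List (String × String)) → Option Int
  | [] => none
  | (i, e) :: rest => if dswStage e ≠ some "Wake" then some i else dswScanF rest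

-- backward loop: for i in range(len-1, -1, -1): if hypnogram[i].get('stage') != 'Wake': break
def dswScanB (hyp : List (List (String × String))) : List Int → Option Int
  | [] => none
  | i :: rest =>
    match PySem.List.pyGet? hyp i with
    | none => none   -- unreachable: every index in the range is valid
    | some e => if dswStage e ≠ some "Wake" then some i else dswScanB hyp rest

def detect_sleep_window (hypnogram : List (List (String × String))) : List (String × Int) :=
  if hypnogram = [] then
    [("sleep_onset_index", 0), ("final_awakening_index", 0), ("sleep_window_epochs", 0),
     ("pre_sleep_wake_epochs", 0), ("post_sleep_wake_epochs", 0)]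
  else
    let sleep_onset_index := dswScanF (PySem.List.enumerate hypnogram 0)
    let final_awakening_index :=
      dswScanB hypnogram (PySem.List.pyRange ((hypnogram.length : Int) - 1) (-1) (-1))
    match sleep_onset_index, final_awakening_index with
    | some s, some f =>
      [("sleep_onset_index", s), ("final_awakening_index", f),
       ("sleep_window_epochs", f - s + 1), ("pre_sleep_wake_epochs", s),
       ("post_sleep_wake_epochs", (hypnogram.length : Int) - f - 1)]
    | _, _ =>
      [("sleep_onset_index", 0), ("final_awakening_index", (hypnogram.length : Int) - 1),
       ("sleep_window_epochs", (hypnogram.length : Int)), ("pre_sleep_wake_epochs", 0),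
       ("post_sleep_wake_epochs", 0)]

-- ===== PORT B =====
-- _span(hyp, base): divide and conquer over hyp[:m] / hyp[m:], merge optional spans
def dswSpan (hyp : List (List (String × String))) (base : Int) : Option (Int × Int) :=
  if hyp.length ≤ 1 then
    match hyp with
    | [] => none
    | e :: _ => if dswStage e ≠ some "Wake" then some (base, base) else none
  else
    let m := hyp.length / 2
    match dswSpan (hyp.take m) base, dswSpan (hyp.drop m) (base + (m : Int)) with
    | none, right => right
    | some l, none => some l
    | some l, some r => some (l.1, r.2)
termination_by hyp.length
decreasing_by
  · simp only [List.length_take]; omega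
  · simp only [List.length_drop]; omega

def detect_sleep_window_alt (hypnogram : List (List (String × String))) : List (String × Int) :=
  if hypnogram = [] then
    [("sleep_onset_index", 0), ("final_awakening_index", 0), ("sleep_window_epochs", 0),
     ("pre_sleep_wake_epochs", 0), ("post_sleep_wake_epochs", 0)]
  else
    match dswSpan hypnogram 0 with
    | none =>
      [("sleep_onset_index", 0), ("final_awakening_index", (hypnogram.length : Int) - 1),
       ("sleep_window_epochs", (hypnogram.length : Int)), ("pre_sleep_wake_epochs", 0),
       ("post_sleep_wake_epochs", 0)]
    | some (s, f) =>
      [("sleep_onset_index", s), ("final_awakening_index", f),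
       ("sleep_window_epochs", f - s + 1), ("pre_sleep_wake_epochs", s),
       ("post_sleep_wake_epochs", (hypnogram.length : Int) - f - 1)]

-- ===== PRECONDITION & SPEC =====
def Spec_detect_sleep_window (hypnogram : List (List (String × String))) (out : List (String × Int)) : Prop := out = detect_sleep_window_alt hypnogram
instance (hypnogram : List (List (String × String))) (out : List (String × Int)) : Decidable (Spec_detect_sleep_window hypnogram out) := by unfold Spec_detect_sleep_window; infer_instance

-- ===== CLAIM (what is proved, stated in full; the proofs are below) =====
def Claim_equal_detect_sleep_window : Prop := ∀ (hypnogram : List (List (String × String))), Dom_detect_sleep_window hypnogram → Spec_detect_sleep_window hypnogram (detect_sleep_window hypnogram)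

-- ===== LEMMAS AND PROOFS =====

-- proof-only midpoint: the list of non-wake indices (neither port computes it)
def dswMatches (s : Int) (hyp : List (List (String × String))) : List Int :=
  (PySem.List.enumerate hyp s).filterMap
    (fun ie => if dswStage ie.2 ≠ some "Wake" then some ie.1 else none)

lemma dswScanF_eq (xs : List (List (String × String))) (s : Int) :
    dswScanF (PySem.List.enumerate xs s) = (dswMatches s xs).head? := by
  induction xs generalizing s with
  | nil => simp [PySem.List.enumerate_nil, dswScanF, dswMatches]
  | cons x xs ih =>
    by_cases h : dswStage x = some "Wake"
    · have := ih (s + 1)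
      simp [dswMatches, PySem.List.enumerate_cons, dswScanF, h] at this ⊢
      exact this
    · simp [dswMatches, PySem.List.enumerate_cons, dswScanF, h]

lemma dswMatches_append (xs ys : List (List (String × String))) (s : Int) :
    dswMatches s (xs ++ ys) = dswMatches s xs ++ dswMatches (s + xs.length) ys := by
  induction xs generalizing s with
  | nil => simp [dswMatches]
  | cons x xs ih =>
    by_cases h : dswStage x ≠ some "Wake" <;>
      simp [dswMatches, PySem.List.enumerate_cons, h] <;>
      · have := ih (s + 1)
        simp [dswMatches] at this
        simp [this]
        ring_nf

lemma dswScanB_eq (hyp : List (List (String × String))) (j : Nat) (hj : j ≤ hyp.length) :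
    dswScanB hyp (PySem.List.pyRange ((j : Int) - 1) (-1) (-1)) =
      (dswMatches 0 (hyp.take j)).getLast? := by
  induction j with
  | zero =>
    rw [PySem.List.pyRange_neg_one_eq_nil (by omega)]
    simp [dswScanB, dswMatches, PySem.List.enumerate_nil]
  | succ j ih =>
    have hjl : j < hyp.length := by omega
    have hcons : PySem.List.pyRange (((j : Nat) + 1 : Int) - 1) (-1) (-1)
        = (j : Int) :: PySem.List.pyRange ((j : Int) - 1) (-1) (-1) := by
      have := PySem.List.pyRange_neg_one_cons (a := (j : Int)) (b := -1) (by omega)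
      simpa using this
    have htake : hyp.take (j + 1) = hyp.take j ++ [hyp[j]] := by
      rw [List.take_add_one, List.getElem?_eq_getElem hjl]
      rfl
    have hget : PySem.List.pyGet? hyp (j : Int) = some hyp[j] := by
      rw [PySem.List.pyGet?_natCast]
      simp [List.getElem?_eq_getElem hjl]
    push_cast
    rw [hcons]
    simp only [dswScanB, hget]
    rw [htake, dswMatches_append]
    by_cases h : dswStage hyp[j] ≠ some "Wake"
    · simp [dswMatches, PySem.List.enumerate_cons, PySem.List.enumerate_nil, h,
        List.length_take, Nat.min_eq_left (le_of_lt hjl)]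
    · simp [dswMatches, PySem.List.enumerate_cons, PySem.List.enumerate_nil, h, ih (by omega)]

-- merge of optional spans, written out for the characterisation lemma
def dswCombine : Option Int → Option Int → Option (Int × Int)
  | some lo, some hi => some (lo, hi)
  | _, _ => none

lemma dswMatches_nil_of_combine_none (M : List Int)
    (h : dswCombine M.head? M.getLast? = none) : M = [] := by
  cases M with
  | nil => rfl
  | cons m rest =>
    rw [List.getLast?_eq_some_getLast (List.cons_ne_nil m rest)] at h
    simp [dswCombine] at h

lemma dswSpan_eq (xs : List (List (String × String))) (b : Int) :
    dswSpan xs b = dswCombine (dswMatches b xs).head? (dswMatches b xs).getLast? := by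
  fun_induction dswSpan xs b with
  | case1 b h =>
    simp [dswMatches, PySem.List.enumerate_nil, dswCombine]
  | case2 b e tl hne hle =>
    simp at hle
    subst hle
    simp [dswMatches, PySem.List.enumerate_cons, PySem.List.enumerate_nil, hne, dswCombine]
  | case3 b e tl hne hle =>
    simp at hle
    subst hle
    simp only [not_not] at hne
    simp [dswMatches, PySem.List.enumerate_cons, PySem.List.enumerate_nil, hne, dswCombine]
  | case4 xs b h m hnone ihT ihD =>
    have hmval : m = xs.length / 2 := rfl
    have hmlen : (xs.take m).length = m := by simp [List.length_take]; omega
    have hML : dswMatches b (xs.take m) = [] :=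
      dswMatches_nil_of_combine_none _ (hnone ▸ ihT).symm
    conv_rhs => rw [(List.take_append_drop m xs).symm]
    rw [dswMatches_append, hmlen, hML, List.nil_append]
    exact ihD
  | case5 xs b h m l hDnone hTsome ihT ihD =>
    have hmval : m = xs.length / 2 := rfl
    have hmlen : (xs.take m).length = m := by simp [List.length_take]; omega
    have hMR : dswMatches (b + (m : Int)) (xs.drop m) = [] :=
      dswMatches_nil_of_combine_none _ (hDnone ▸ ihD).symm
    conv_rhs => rw [(List.take_append_drop m xs).symm]
    rw [dswMatches_append, hmlen, hMR, List.append_nil]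
    rw [← ihT, hTsome]
  | case6 xs b h m l r hR hL ihT ihD =>
    have hmval : m = xs.length / 2 := rfl
    have hmlen : (xs.take m).length = m := by simp [List.length_take]; omega
    conv_rhs => rw [(List.take_append_drop m xs).symm]
    rw [dswMatches_append, hmlen]
    rw [hL] at ihT; rw [hR] at ihD
    cases hMLc : dswMatches b (xs.take m) with
    | nil => rw [hMLc] at ihT; simp [dswCombine] at ihT
    | cons ml mls =>
      cases hMRc : dswMatches (b + (m : Int)) (xs.drop m) with
      | nil => rw [hMRc] at ihD; simp [dswCombine] at ihD
      | cons mr mrs =>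
        rw [hMLc] at ihT; rw [hMRc] at ihD
        rw [List.getLast?_eq_some_getLast (List.cons_ne_nil ml mls)] at ihT
        rw [List.getLast?_eq_some_getLast (List.cons_ne_nil mr mrs)] at ihD
        simp only [List.head?_cons, dswCombine, Option.some.injEq] at ihT ihD
        rw [List.getLast?_append_of_ne_nil (l₁ := ml :: mls) (List.cons_ne_nil mr mrs)]
        rw [List.getLast?_eq_some_getLast (List.cons_ne_nil mr mrs)]
        simp only [List.cons_append, List.head?_cons, dswCombine]
        rw [ihT, ihD]

-- ===== VERDICT (by name: the statement is the Claim_ definition above) =====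
theorem detect_sleep_window_spec : Claim_equal_detect_sleep_window := by
  intro hyp _
  unfold Spec_detect_sleep_window detect_sleep_window detect_sleep_window_alt
  by_cases hnil : hyp = []
  · simp [hnil]
  · rw [if_neg hnil, if_neg hnil]
    have h1 := dswScanF_eq hyp 0
    have h2 := dswScanB_eq hyp hyp.length (le_refl _)
    simp only [List.take_length] at h2
    rw [h1, h2, dswSpan_eq]
    cases hm : dswMatches 0 hyp with
    | nil => simp [dswCombine]
    | cons m rest =>
      rw [List.getLast?_eq_some_getLast (List.cons_ne_nil m rest)]
      simp [dswCombine]
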